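-- pv_equiv track=rewrite | github.com/TheAlgorithms/Python | bit_manipulation/binary_xor_operator.py | binary_xor
-- ===== SOURCE A (Python) =====
-- def binary_xor(a: int, b: int) -> str:
--     """
--     Take in 2 integers, convert them to binary,
--     return a binary number that is the
--     result of a binary xor operation on the integers provided.
--     The XOR operation compares each bit position of two numbers. The result has a 1 bit
--     only when the input bits are DIFFERENT (one is 1 and the other is 0);
--     the result is 0 when both input bits are the same (both 0 or both 1).
--     Algorithm:
--     1. Convert both numbers to binary representation
--     2. Pad shorter binary string with leading zeros
--     3. For each bit position, output 1 if input bits are different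
--     4. Output 0 if input bits are the same
--     5. Return the result as a binary string
--     Example: 25 (0b11001) XOR 32 (0b100000)
--     Position: 5 4 3 2 1 0
--     25:       0 1 1 0 0 1
--     32:       1 0 0 0 0 0
--     Result:   1 1 1 0 0 1 = 57 (all positions have different bits)
--     >>> binary_xor(25, 32)
--     '0b111001'
--     >>> binary_xor(37, 50)
--     '0b010111'
--     >>> binary_xor(21, 30)
--     '0b01011'
--     >>> binary_xor(58, 73)
--     '0b1110011'
--     >>> binary_xor(0, 255)
--     '0b11111111'
--     >>> binary_xor(256, 256)
--     '0b000000000'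
--     >>> binary_xor(0, -1)
--     Traceback (most recent call last):
--         ...
--     ValueError: the value of both inputs must be positive
--     >>> binary_xor(0, 1.1)
--     Traceback (most recent call last):
--         ...
--     TypeError: 'float' object cannot be interpreted as an integer
--     >>> binary_xor("0", "1")
--     Traceback (most recent call last):
--         ...
--     TypeError: '<' not supported between instances of 'str' and 'int'
--     """
--     if a < 0 or b < 0:
--         raise ValueError("the value of both inputs must be positive")
--
--     a_binary = str(bin(a))[2:]  # remove the leading "0b"
--     b_binary = str(bin(b))[2:]  # remove the leading "0b"
--
--     max_len = max(len(a_binary), len(b_binary))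
--
--     return "0b" + "".join(
--         str(int(char_a != char_b))
--         for char_a, char_b in zip(a_binary.zfill(max_len), b_binary.zfill(max_len))
--     )
-- ===== SOURCE B (Python) =====
-- def binary_xor(a: int, b: int) -> str:
--     """XOR two non-negative ints bit-by-bit from the integers themselves: no
--     intermediate binary strings; width from bit_length, bits read by shift/mask."""
--     if a < 0 or b < 0:
--         raise ValueError("the value of both inputs must be positive")
--     n = max(a.bit_length(), b.bit_length(), 1)
--     x = a ^ b
--     return "0b" + "".join("1" if (x >> i) & 1 else "0" for i in range(n - 1, -1, -1))
-- ===== Notes on version B (the rewrite author's own statement) =====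
-- stated objective: alternative
-- what changed: Replaces A's binary-string pipeline (bin(), zfill, per-character zip/compare/join) with pure integer arithmetic: width from bit_length(), one native a ^ b, and each output character read off by shift-and-mask, so no intermediate binary strings exist at all.
import Mathlib
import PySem

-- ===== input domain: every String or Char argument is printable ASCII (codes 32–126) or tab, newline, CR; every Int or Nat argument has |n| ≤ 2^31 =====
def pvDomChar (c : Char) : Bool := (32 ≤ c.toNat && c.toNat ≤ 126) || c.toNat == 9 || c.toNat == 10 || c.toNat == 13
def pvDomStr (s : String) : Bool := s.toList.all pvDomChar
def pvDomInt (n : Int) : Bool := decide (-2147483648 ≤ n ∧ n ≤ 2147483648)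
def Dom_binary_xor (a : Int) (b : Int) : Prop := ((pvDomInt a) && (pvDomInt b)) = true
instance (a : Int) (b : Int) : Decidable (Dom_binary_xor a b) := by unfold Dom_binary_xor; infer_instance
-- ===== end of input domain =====

-- B replaces A's binary-string pipeline (bin, zfill, zip/compare/join) by integer arithmetic:
-- width from bit_length, one native XOR, characters read off by shift-and-mask (alternative;
-- return-value equivalence on a,b ≥ 0).

-- ===== PORT A =====
-- str(bin(a))[2:] = PySem.List.slice … (some 2); "".join(str(int(ca != cb)) …) builds the char list;
-- "0b" + … = String.ofList ('0' :: 'b' :: …). All exact on 0 ≤ a, 0 ≤ b (Pre_).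
def binary_xor (a : Int) (b : Int) : String :=
  let a_binary := PySem.List.slice (PySem.Int.pyBin a).toList (some 2)
  let b_binary := PySem.List.slice (PySem.Int.pyBin b).toList (some 2)
  let max_len := max a_binary.length b_binary.length
  String.ofList ('0' :: 'b' ::
    ((List.zip (PySem.Chars.zfill a_binary (max_len : Int))
               (PySem.Chars.zfill b_binary (max_len : Int))).map
      (fun p => if p.1 ≠ p.2 then '1' else '0')))

-- ===== PORT B =====
-- n = max(a.bit_length(), b.bit_length(), 1); x = a ^ b;
-- "0b" + "".join("1" if (x >> i) & 1 else "0" for i in range(n-1, -1, -1)).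
-- i ranges over n-1 … 0, so i ≥ 0 and the shift x >> i is i.toNat steps (exact here).
def binary_xor_alt (a : Int) (b : Int) : String :=
  let n : Nat := max (max (PySem.Int.bitLength a) (PySem.Int.bitLength b)) 1
  let x := PySem.Int.bxor a b
  String.ofList ('0' :: 'b' ::
    (PySem.List.pyRange ((n : Int) - 1) (-1) (-1)).map
      (fun i => if PySem.Int.band (x >>> i.toNat) 1 ≠ 0 then '1' else '0'))

-- ===== PRECONDITION & SPEC =====
-- A raises ValueError when a < 0 or b < 0; Pre_ admits exactly the inputs where A returns.
def Pre_binary_xor (a : Int) (b : Int) : Prop := 0 ≤ a ∧ 0 ≤ b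
instance (a : Int) (b : Int) : Decidable (Pre_binary_xor a b) := by unfold Pre_binary_xor; infer_instance
def pvWitness_binary_xor : Int × Int := (25, 32)

def Spec_binary_xor (a : Int) (b : Int) (out : String) : Prop := out = binary_xor_alt a b
instance (a : Int) (b : Int) (out : String) : Decidable (Spec_binary_xor a b out) := by unfold Spec_binary_xor; infer_instance

-- ===== CLAIM (what is proved, stated in full; the proofs are below) =====
def Claim_equal_binary_xor : Prop := ∀ (a : Int) (b : Int), Dom_binary_xor a b → Pre_binary_xor a b → Spec_binary_xor a b (binary_xor a b)

-- ===== LEMMAS AND PROOFS =====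

-- little-endian binary digits of n ('0'/'1' chars), [] for 0
def pvBitsLE (n : Nat) : List Char :=
  if h : n = 0 then [] else (if n % 2 = 1 then '1' else '0') :: pvBitsLE (n / 2)
decreasing_by exact Nat.div_lt_self (Nat.pos_of_ne_zero h) (by norm_num)

-- big-endian digit string as Python's bin(n)[2:] produces it
def pvBinStr (n : Nat) : List Char := if n = 0 then ['0'] else (pvBitsLE n).reverse

-- the L low bits of n, little-endian
def pvPadLE (L n : Nat) : List Char := (List.range L).map (fun i => if n.testBit i then '1' else '0')

lemma pvBitsLE_zero : pvBitsLE 0 = [] := by unfold pvBitsLE; simp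

lemma pvBitsLE_pos {n : Nat} (h : n ≠ 0) :
    pvBitsLE n = (if n % 2 = 1 then '1' else '0') :: pvBitsLE (n / 2) := by
  rw [pvBitsLE]; simp [h]

lemma pvBinStr_pos {n : Nat} (h : n ≠ 0) : pvBinStr n = (pvBitsLE n).reverse := by
  rw [pvBinStr, if_neg h]

lemma pvToDigitsCore_eq : ∀ (fuel n : Nat) (ds : List Char), n ≠ 0 → n < 2 ^ fuel →
    Nat.toDigitsCore 2 fuel n ds = pvBinStr n ++ ds := by
  intro fuel
  induction fuel with
  | zero =>
    intro n ds hn h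
    rw [pow_zero] at h
    omega
  | succ f ih =>
    intro n ds hn h
    simp only [Nat.toDigitsCore]
    have hd : (n % 2).digitChar = (if n % 2 = 1 then '1' else '0') := by
      rcases Nat.mod_two_eq_zero_or_one n with h2 | h2 <;> rw [h2] <;> rfl
    by_cases h0 : n / 2 = 0
    · simp only [h0, if_true]
      have : n = 1 := by omega
      subst this
      rw [pvBinStr_pos hn, pvBitsLE_pos hn]
      simp [pvBitsLE_zero, Nat.digitChar]
    · simp only [h0, if_false]
      have hlt : n / 2 < 2 ^ f := by
        have := Nat.pow_succ 2 f
        omega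
      rw [ih (n / 2) _ h0 hlt]
      rw [pvBinStr_pos hn, pvBitsLE_pos hn, pvBinStr_pos h0]
      simp [hd]

lemma pvToDigits_eq (n : Nat) : Nat.toDigits 2 n = pvBinStr n := by
  by_cases h0 : n = 0
  · subst h0; rfl
  · have h : n < 2 ^ (n + 1) := lt_of_lt_of_le (Nat.lt_two_pow_self) (Nat.pow_le_pow_right (by norm_num) (by omega))
    simpa using pvToDigitsCore_eq (n + 1) n [] h0 h

-- bin(a)[2:] as it appears in port A
lemma pvChars_eq (a : Int) (ha : 0 ≤ a) :
    PySem.List.slice (PySem.Int.pyBin a).toList (some 2) = pvBinStr a.toNat := by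
  rw [PySem.List.slice_from _ (by norm_num : (0:Int) ≤ 2)]
  rw [PySem.Int.toList_pyBin, PySem.Int.toBinChars0b]
  rw [if_neg (by omega)]
  simp [pvToDigits_eq]

lemma pvBitsLE_len : ∀ (L n : Nat), (pvBitsLE n).length ≤ L ↔ n < 2 ^ L := by
  intro L
  induction L with
  | zero =>
    intro n
    constructor
    · intro h
      rcases Nat.eq_zero_or_pos n with rfl | hp
      · simp
      · exfalso
        rw [pvBitsLE_pos (by omega)] at h
        simp at h
    · intro h
      rw [pow_zero] at h
      have : n = 0 := by omega
      simp [this, pvBitsLE_zero]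
  | succ L ih =>
    intro n
    by_cases h0 : n = 0
    · subst h0; simp [pvBitsLE_zero]
    · rw [pvBitsLE_pos h0]
      simp only [List.length_cons]
      rw [Nat.add_one_le_add_one_iff, ih (n / 2)]
      have := Nat.pow_succ 2 L
      omega

lemma pvLt_two_pow_of_len_le {n L : Nat} (h : (pvBinStr n).length ≤ L) : n < 2 ^ L := by
  by_cases h0 : n = 0
  · subst h0; positivity
  · rw [pvBinStr, if_neg h0, List.length_reverse] at h
    exact (pvBitsLE_len L n).mp h

lemma pvBinStr_len_pos (n : Nat) : 1 ≤ (pvBinStr n).length := by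
  by_cases h0 : n = 0
  · simp [h0, pvBinStr]
  · rw [pvBinStr, if_neg h0, List.length_reverse, pvBitsLE_pos h0]
    simp

lemma pvPad_eq : ∀ (L n : Nat), n < 2 ^ L →
    pvBitsLE n ++ List.replicate (L - (pvBitsLE n).length) '0' = pvPadLE L n := by
  intro L
  induction L with
  | zero =>
    intro n h
    have : n = 0 := by omega
    simp [this, pvBitsLE_zero, pvPadLE]
  | succ L ih =>
    intro n h
    by_cases h0 : n = 0
    · subst h0
      simp only [pvBitsLE_zero, List.length_nil, Nat.sub_zero, List.nil_append]
      rw [pvPadLE]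
      simp
    · have hlt : n / 2 < 2 ^ L := by
        have := Nat.pow_succ 2 L
        omega
      rw [pvBitsLE_pos h0]
      rw [pvPadLE, List.range_succ_eq_map, List.map_cons, List.map_map]
      have hhead : (if n.testBit 0 then '1' else '0') = (if n % 2 = 1 then '1' else '0') := by
        rw [Nat.testBit_zero]; by_cases h2 : n % 2 = 1 <;> simp [h2]
      have htail : List.map ((fun i => if n.testBit i then '1' else '0') ∘ Nat.succ) (List.range L)
          = pvPadLE L (n / 2) := by
        rw [pvPadLE]
        apply List.map_congr_left
        intro i _
        simp [Function.comp, Nat.testBit_succ]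
      rw [hhead, htail, ← ih (n / 2) hlt]
      simp [List.length_cons, Nat.succ_sub_succ]

lemma pvBitsLE_chars : ∀ (n : Nat) (c : Char), c ∈ pvBitsLE n → c = '0' ∨ c = '1' := by
  intro n
  induction n using Nat.strong_induction_on with
  | _ n ih =>
    intro c hc
    by_cases h0 : n = 0
    · rw [h0, pvBitsLE_zero] at hc; simp at hc
    · rw [pvBitsLE_pos h0] at hc
      rcases List.mem_cons.mp hc with h | h
      · by_cases h2 : n % 2 = 1 <;> simp [h2] at h <;> simp [h]
      · exact ih (n / 2) (Nat.div_lt_self (Nat.pos_of_ne_zero h0) (by norm_num)) c h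

lemma pvZfill_binStr {L n : Nat} (hL : 1 ≤ L) (h : n < 2 ^ L) :
    PySem.Chars.zfill (pvBinStr n) (L : Int) = (pvPadLE L n).reverse := by
  have hlen : (pvBinStr n).length ≤ L := by
    by_cases h0 : n = 0
    · simpa [h0, pvBinStr] using hL
    · rw [pvBinStr, if_neg h0, List.length_reverse]
      exact (pvBitsLE_len L n).mpr h
  have hrev : (pvPadLE L n).reverse
      = List.replicate (L - (pvBitsLE n).length) '0' ++ (pvBitsLE n).reverse := by
    rw [← pvPad_eq L n h]; simp
  by_cases h0 : n = 0
  · subst h0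
    have hpad : (pvPadLE L 0).reverse = List.replicate L '0' := by
      have : pvPadLE L 0 = List.replicate L '0' := by
        simp [pvPadLE, Nat.zero_testBit, List.map_const', List.length_range]
      rw [this, List.reverse_replicate]
    rw [hpad, PySem.Chars.zfill.eq_def]
    simp only [pvBinStr, if_true]
    by_cases hle : (L : Int) ≤ (([ '0' ] : List Char).length : Int)
    · have : L = 1 := by simp at hle; omega
      subst this
      simp
    · rw [if_neg (by simpa using hle)]
      have hsign : ¬ ('0' = '+' ∨ '0' = '-') := by decide
      simp only [hsign, if_false]
      have h1 : ((L : Int)).toNat = L := by omega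
      have h2 : L = (L - 1) + 1 := by omega
      rw [h1]
      simp only [List.length_cons, List.length_nil]
      rw [h2]
      simp [List.replicate_succ']
  · have hne : pvBinStr n ≠ [] := by
      intro hnil
      have := pvBinStr_len_pos n
      rw [hnil] at this; simp at this
    obtain ⟨c, rest, hcr⟩ := List.exists_cons_of_ne_nil hne
    have hcmem : c ∈ pvBinStr n := by rw [hcr]; simp
    have hc01 : c = '0' ∨ c = '1' := by
      rw [pvBinStr, if_neg h0] at hcmem
      exact pvBitsLE_chars n c (List.mem_reverse.mp hcmem)
    have hsign : ¬ (c = '+' ∨ c = '-') := by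
      rcases hc01 with rfl | rfl <;> decide
    rw [PySem.Chars.zfill.eq_def]
    by_cases hle : (L : Int) ≤ (pvBinStr n).length
    · rw [if_pos hle]
      have hLeq : (pvBinStr n).length = L := by
        have : (L : Int) ≤ ((pvBinStr n).length : Int) := by simpa using hle
        omega
      rw [hrev, pvBinStr, if_neg h0]
      have : L - (pvBitsLE n).length = 0 := by
        rw [pvBinStr, if_neg h0, List.length_reverse] at hLeq
        omega
      rw [this]
      simp
    · rw [if_neg hle, hcr]
      simp only [hsign, if_false]
      rw [← hcr, hrev, pvBinStr, if_neg h0]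
      have h1 : ((L:Int)).toNat = L := by omega
      have h2 : (pvBinStr n).length = (pvBitsLE n).length := by
        rw [pvBinStr, if_neg h0, List.length_reverse]
      rw [h1]
      simp

lemma pvZipWith_self_map {α β : Type} (f : α → α → β) :
    ∀ (l : List α), List.zipWith f l l = l.map (fun x => f x x) := by
  intro l
  induction l with
  | nil => rfl
  | cons x xs ih => simp

lemma pvLength_padLE (L n : Nat) : (pvPadLE L n).length = L := by simp [pvPadLE]

-- A's character list in closed form: the reversed L low bits of m ^^^ k
lemma pvCore (m k L : Nat) :
    (List.zip ((pvPadLE L m).reverse) ((pvPadLE L k).reverse)).map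
      (fun p => if p.1 ≠ p.2 then '1' else '0')
    = (pvPadLE L (m ^^^ k)).reverse := by
  rw [List.zip_eq_zipWith, List.map_zipWith]
  rw [← List.reverse_zipWith (by simp [pvLength_padLE])]
  congr 1
  rw [pvPadLE, pvPadLE, List.zipWith_map_left, List.zipWith_map_right,
    pvZipWith_self_map, pvPadLE]
  apply List.map_congr_left
  intro i _
  rw [Nat.testBit_xor]
  cases hm : m.testBit i <;> cases hk : k.testBit i <;> simp

-- (pvBitsLE m).length is Python's m.bit_length() for m ≠ 0
lemma pvBitsLE_length_eq : ∀ (m : Nat), m ≠ 0 → (pvBitsLE m).length = PySem.Int.bitLength (m : Int) := by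
  intro m
  induction m using Nat.strong_induction_on with
  | _ m ih =>
    intro h0
    rw [pvBitsLE_pos h0, List.length_cons,
      PySem.Int.bitLength_natCast (Nat.pos_of_ne_zero h0)]
    by_cases h2 : m / 2 = 0
    · rw [h2, pvBitsLE_zero]
      simp [PySem.Int.bitLength_zero]
    · rw [ih (m / 2) (Nat.div_lt_self (Nat.pos_of_ne_zero h0) (by norm_num)) h2]

lemma pvBinStr_length (m : Nat) :
    (pvBinStr m).length = max (PySem.Int.bitLength (m : Int)) 1 := by
  by_cases h0 : m = 0
  · simp [h0, pvBinStr, PySem.Int.bitLength_zero]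
  · rw [pvBinStr, if_neg h0, List.length_reverse, pvBitsLE_length_eq m h0]
    have : 1 ≤ PySem.Int.bitLength (m : Int) := by
      rw [PySem.Int.bitLength_natCast (Nat.pos_of_ne_zero h0)]; omega
    omega

-- B's generator in closed form: the same reversed padded bit list
lemma pvCoreB (p L : Nat) (hL : 1 ≤ L) :
    (PySem.List.pyRange ((L : Int) - 1) (-1) (-1)).map
      (fun i => if PySem.Int.band (((p : Nat) : Int) >>> i.toNat) 1 ≠ 0 then '1' else '0')
    = (pvPadLE L p).reverse := by
  rw [PySem.List.pyRange_neg_one, List.map_map]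
  have hlen : (((L : Int) - 1) - (-1)).toNat = L := by omega
  rw [hlen]
  apply List.ext_getElem
  · simp [pvLength_padLE]
  · intro j hj hj'
    have hjL : j < L := by simpa [pvLength_padLE] using hj'
    rw [List.getElem_reverse]
    simp only [List.getElem_map, List.getElem_range, Function.comp, pvPadLE,
      List.length_map, List.length_range]
    have ht : ((L : Int) - 1 - (j : Int)).toNat = L - 1 - j := by omega
    rw [ht, Int.shiftRight_natCast]
    have hq : p.testBit (L - 1 - j) = decide ((p >>> (L - 1 - j)) % 2 = 1) :=
      Eq.symm Nat.decide_shiftRight_mod_two_eq_one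
    have hb : PySem.Int.band (((p >>> (L - 1 - j) : Nat)) : Int) 1
        = ((((p >>> (L - 1 - j)) % 2 : Nat)) : Int) := by
      rw [show ((1 : Int)) = (((1 : Nat)) : Int) from rfl, PySem.Int.band_natCast,
        Nat.and_one_is_mod]
    rw [hb, hq]
    rcases Nat.mod_two_eq_zero_or_one (p >>> (L - 1 - j)) with h2 | h2 <;> rw [h2] <;> simp

-- ===== VERDICT (by name: the statement is the Claim_ definition above) =====
theorem binary_xor_spec : Claim_equal_binary_xor := by
  intro a b _ hpre
  obtain ⟨ha, hb⟩ := hpre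
  unfold Spec_binary_xor binary_xor binary_xor_alt
  simp only [pvChars_eq a ha, pvChars_eq b hb]
  set m := a.toNat with hm'
  set k := b.toNat with hk'
  have hxa : PySem.Int.bxor a b = ((m ^^^ k : Nat) : Int) := by
    rw [PySem.Int.bxor_of_nonneg ha hb]
  set L := max (pvBinStr m).length (pvBinStr k).length with hL
  have hL1 : 1 ≤ L := le_trans (pvBinStr_len_pos m) (le_max_left _ _)
  have hm : m < 2 ^ L := pvLt_two_pow_of_len_le (le_max_left _ _)
  have hk : k < 2 ^ L := pvLt_two_pow_of_len_le (le_max_right _ _)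
  have hLB : max (max (PySem.Int.bitLength a) (PySem.Int.bitLength b)) 1 = L := by
    have ha' : a = ((m : Nat) : Int) := by omega
    have hb' : b = ((k : Nat) : Int) := by omega
    rw [hL, pvBinStr_length m, pvBinStr_length k, ha', hb']
    omega
  rw [pvZfill_binStr hL1 hm, pvZfill_binStr hL1 hk, pvCore, hLB, hxa, pvCoreB _ _ hL1]
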